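-- pv_equiv track=rewrite | github.com/HAR5HA-7663/luffy-gpt | dataset/build_final_conversational.py | format_shakespeare_style
-- ===== SOURCE A (Python) =====
-- def format_shakespeare_style(dialogues):
--     """Format dialogue list into TinyShakespeare style."""
--     blocks = []
--     current_char = None
--     current_lines = []
--
--     for char, line in dialogues:
--         if char == current_char:
--             current_lines.append(line)
--         else:
--             if current_lines and current_char:
--                 blocks.append(f"{current_char}:\n" + '\n'.join(current_lines))
--             current_char = char
--             current_lines = [line]
--
--     if current_lines and current_char:
--         blocks.append(f"{current_char}:\n" + '\n'.join(current_lines))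
--
--     return '\n\n'.join(blocks)
-- ===== SOURCE B (Python) =====
-- def format_shakespeare_style(dialogues):
--     """Format dialogue list into TinyShakespeare style.
--
--     Run-splitting rewrite: walk the list with two indices, carving out each
--     maximal consecutive run of one speaker, instead of A's current_char/
--     current_lines state machine."""
--     blocks = []
--     i = 0
--     n = len(dialogues)
--     while i < n:
--         char = dialogues[i][0]
--         j = i
--         while j < n and dialogues[j][0] == char:
--             j += 1
--         if char:
--             blocks.append(char + ":\n" + '\n'.join(line for _, line in dialogues[i:j]))
--         i = j
--     return '\n\n'.join(blocks)
-- ===== Notes on version B (the rewrite author's own statement) =====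
-- stated objective: alternative
-- what changed: Replaces A's current_char/current_lines state machine (with flush-on-change and a trailing flush) by a two-index run-splitting loop that carves out each maximal consecutive run of one speaker and formats it directly.
import Mathlib
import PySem

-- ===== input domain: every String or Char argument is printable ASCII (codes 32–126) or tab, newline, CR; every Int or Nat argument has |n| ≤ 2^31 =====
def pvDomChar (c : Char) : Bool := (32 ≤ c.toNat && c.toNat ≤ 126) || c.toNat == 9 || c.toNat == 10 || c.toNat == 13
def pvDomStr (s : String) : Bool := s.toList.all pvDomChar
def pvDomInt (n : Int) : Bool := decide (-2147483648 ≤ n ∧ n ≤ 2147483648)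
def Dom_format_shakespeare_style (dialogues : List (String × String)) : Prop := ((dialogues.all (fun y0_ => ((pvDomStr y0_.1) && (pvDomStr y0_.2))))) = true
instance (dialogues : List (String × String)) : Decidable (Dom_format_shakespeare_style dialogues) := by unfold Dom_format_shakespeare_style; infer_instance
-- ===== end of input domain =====

-- B replaces A's current-speaker/current-lines state machine by a run-splitting
-- loop over maximal consecutive same-speaker runs (objective: alternative).

-- ===== PORT A =====
-- truthiness of current_char (None or "" are falsy)
def fssTruthy : Option String → Bool
  | none => false
  | some s => s ≠ ""

-- f"{current_char}:\n" + '\n'.join(current_lines)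
def fssFmt (cur : Option String) (lines : List String) : String :=
  (match cur with | some s => s | none => "None") ++ ":\n" ++ PySem.Str.join "\n" lines

-- one iteration of A's for-loop over state (blocks, current_char, current_lines)
def fssStep (st : List String × Option String × List String) (p : String × String) :
    List String × Option String × List String :=
  match st, p with
  | (blocks, cur, lines), (c, line) =>
    if (some c == cur) then (blocks, cur, lines ++ [line])
    else
      ((if lines ≠ [] ∧ fssTruthy cur then blocks ++ [fssFmt cur lines] else blocks),
        some c, [line])

-- the trailing flush after the loop
def fssFinal (st : List String × Option String × List String) : List String :=
  match st with
  | (blocks, cur, lines) =>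
    if lines ≠ [] ∧ fssTruthy cur then blocks ++ [fssFmt cur lines] else blocks

def format_shakespeare_style (dialogues : List (String × String)) : String :=
  PySem.Str.join "\n\n" (fssFinal (dialogues.foldl fssStep ([], none, [])))

-- ===== PORT B =====
-- B's outer while loop: peel off the maximal run of the current speaker
-- (the inner while / the slice dialogues[i:j] become takeWhile / dropWhile)
def fssAltGo (l : List (String × String)) : List String :=
  match l with
  | [] => []
  | (c, line) :: rest =>
    let run := rest.takeWhile (fun p => p.1 == c)
    let rest' := rest.dropWhile (fun p => p.1 == c)
    (if c ≠ "" then [c ++ ":\n" ++ PySem.Str.join "\n" (line :: run.map Prod.snd)] else [])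
      ++ fssAltGo rest'
termination_by l.length
decreasing_by
  simp only [List.length_cons]
  exact Nat.lt_succ_of_le (List.length_dropWhile_le _ _)

def format_shakespeare_style_alt (dialogues : List (String × String)) : String :=
  PySem.Str.join "\n\n" (fssAltGo dialogues)

-- ===== PRECONDITION & SPEC =====
def Spec_format_shakespeare_style (dialogues : List (String × String)) (out : String) : Prop := out = format_shakespeare_style_alt dialogues
instance (dialogues : List (String × String)) (out : String) : Decidable (Spec_format_shakespeare_style dialogues out) := by unfold Spec_format_shakespeare_style; infer_instance

-- ===== CLAIM (what is proved, stated in full; the proofs are below) =====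
def Claim_equal_format_shakespeare_style : Prop := ∀ (dialogues : List (String × String)), Dom_format_shakespeare_style dialogues → Spec_format_shakespeare_style dialogues (format_shakespeare_style dialogues)

-- ===== LEMMAS AND PROOFS =====

lemma fssAltGo_nil : fssAltGo [] = [] := by
  rw [fssAltGo.eq_def]

lemma fssAltGo_cons (c line : String) (rest : List (String × String)) :
    fssAltGo ((c, line) :: rest) =
      (if c ≠ "" then
        [c ++ ":\n" ++ PySem.Str.join "\n" (line :: (rest.takeWhile (fun p => p.1 == c)).map Prod.snd)]
       else [])
        ++ fssAltGo (rest.dropWhile (fun p => p.1 == c)) := by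
  rw [fssAltGo.eq_def]

-- block text B builds for a run
def fssMk (c : String) (lines : List String) : String :=
  c ++ ":\n" ++ PySem.Str.join "\n" lines

-- the list of blocks produced from a pending run (speaker c, lines so far) and the remaining input
def fssCollect : String → List String → List (String × String) → List String
  | c, lines, [] => if c ≠ "" then [fssMk c lines] else []
  | c, lines, (c', l') :: rest =>
    if c' == c then fssCollect c (lines ++ [l']) rest
    else (if c ≠ "" then [fssMk c lines] else []) ++ fssCollect c' [l'] rest

lemma fssFoldl_collect (l : List (String × String)) :
    ∀ (blocks : List String) (c : String) (lines : List String), lines ≠ [] →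
    fssFinal (l.foldl fssStep (blocks, some c, lines)) = blocks ++ fssCollect c lines l := by
  induction l with
  | nil =>
    intro blocks c lines h
    simp only [List.foldl_nil, fssFinal, fssCollect, fssTruthy, fssFmt]
    by_cases hc : c = ""
    · subst hc; simp [h]
    · simp [h, hc, fssMk]
  | cons p t ih =>
    obtain ⟨c', l'⟩ := p
    intro blocks c lines h
    simp only [List.foldl_cons, fssStep]
    by_cases hcc : c' = c
    · subst hcc
      rw [if_pos (by simp)]
      rw [ih blocks c' (lines ++ [l']) (by simp)]
      simp [fssCollect]
    · rw [if_neg (by simp [hcc])]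
      rw [ih _ c' [l'] (by simp)]
      by_cases hc : c = ""
      · subst hc
        simp [fssTruthy, fssCollect, hcc]
      · simp only [fssTruthy]
        rw [if_pos ⟨h, by simp [hc]⟩]
        simp [fssCollect, hcc, fssMk, fssFmt, hc, List.append_assoc]

lemma fssCollect_eq_go (rest : List (String × String)) :
    ∀ (c : String) (lines : List String),
    fssCollect c lines rest =
      (if c ≠ "" then [fssMk c (lines ++ (rest.takeWhile (fun p => p.1 == c)).map Prod.snd)] else [])
        ++ fssAltGo (rest.dropWhile (fun p => p.1 == c)) := by
  induction rest with
  | nil => intro c lines; simp [fssCollect, fssAltGo_nil]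
  | cons p t ih =>
    obtain ⟨c', l'⟩ := p
    intro c lines
    by_cases hcc : c' = c
    · subst hcc
      simp only [fssCollect, beq_self_eq_true, if_true, List.takeWhile_cons,
        List.dropWhile_cons]
      rw [ih c' (lines ++ [l'])]
      simp
    · simp only [fssCollect, List.takeWhile_cons, List.dropWhile_cons]
      rw [if_neg (by simp [hcc]), ih c' [l']]
      simp only [beq_iff_eq, hcc, if_false]
      congr 1
      · simp
      · rw [fssAltGo_cons]
        simp [fssMk]

lemma fssGo_eq_collect (c : String) (l' : String) (rest : List (String × String)) :
    fssAltGo ((c, l') :: rest) = fssCollect c [l'] rest := by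
  rw [fssCollect_eq_go, fssAltGo_cons]
  simp [fssMk]

-- ===== VERDICT (by name: the statement is the Claim_ definition above) =====
theorem format_shakespeare_style_spec : Claim_equal_format_shakespeare_style := by
  intro dialogues _
  unfold Spec_format_shakespeare_style format_shakespeare_style format_shakespeare_style_alt
  match dialogues with
  | [] => simp [fssFinal, fssAltGo_nil]
  | (c, l') :: rest =>
    have h1 : fssStep ([], none, []) (c, l') = ([], some c, [l']) := by
      simp [fssStep, fssTruthy]
    rw [List.foldl_cons, h1, fssFoldl_collect rest [] c [l'] (by simp),
      List.nil_append, fssGo_eq_collect]
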